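-- pv_equiv track=rewrite | github.com/HugoMFFernandes/Exerc-cios_Pc_1 | Python/Exames/Exame_2024_B_v2.py | Transforma_vetor
-- ===== SOURCE A (Python) =====
-- def Transforma_vetor(X):
--     Y=[0]*len(X)
--     #Fatorial do elemento 0 até len(X)-1
--     for i in range(len(X)-1):
--         factorial=1
--         for j in range(1,X[i+1]+1):
--             factorial*=j
--         Y[i]=factorial
--
--     #Fatoerial elemento len(X)
--     factorial=1
--     for j in range(1,X[0]+1):
--         factorial*=j
--     Y[len(X)-1]=factorial
--
--     return Y
-- ===== SOURCE B (Python) =====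
-- def _prod(lo, hi):
--     # product of the integers in [lo, hi] by binary splitting
--     if lo > hi:
--         return 1
--     if lo == hi:
--         return lo
--     mid = (lo + hi) // 2
--     return _prod(lo, mid) * _prod(mid + 1, hi)
--
-- def Transforma_vetor(X):
--     return [_prod(2, v) for v in X[1:] + [X[0]]]
-- ===== Notes on version B (the rewrite author's own statement) =====
-- stated objective: alternative
-- what changed: Builds the rotated list (tail of X followed by its first element) once and maps a divide-and-conquer binary-splitting range product over it, instead of A's preallocated array written by index with the rotation split into a loop plus a special-cased last write and a sequential multiply loop per element.
import Mathlib
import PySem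

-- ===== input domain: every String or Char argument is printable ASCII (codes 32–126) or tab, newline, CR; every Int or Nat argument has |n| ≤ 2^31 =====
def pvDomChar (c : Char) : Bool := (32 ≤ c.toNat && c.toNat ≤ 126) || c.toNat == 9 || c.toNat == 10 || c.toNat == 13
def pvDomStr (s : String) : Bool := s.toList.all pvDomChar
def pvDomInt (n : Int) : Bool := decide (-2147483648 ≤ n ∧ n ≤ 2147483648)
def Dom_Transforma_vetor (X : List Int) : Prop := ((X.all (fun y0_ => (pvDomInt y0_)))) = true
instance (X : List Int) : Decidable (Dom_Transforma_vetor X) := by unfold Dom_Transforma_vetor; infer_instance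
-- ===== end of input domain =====

-- B builds the rotated list (the tail of X followed by its first element) once and maps a binary-splitting range product over it, instead of
-- A's preallocated array written by index with the rotation split into a loop plus a special-cased last write.

-- ===== PORT A =====
-- inner 'for j in range(1, X[..]+1): factorial *= j'
def pvFactLoop (n : Int) : Int :=
  (PySem.List.pyRange 1 (n + 1) 1).foldl (fun acc j => acc * j) 1

def Transforma_vetor (X : List Int) : List Int :=
  -- Y preallocated with zeros; the loop writes Y at index i; then 'Y[len(X)-1] = factorial' (on [] Python raises IndexError: excluded by Pre_)
  ((PySem.List.pyRange 0 ((X.length : Int) - 1) 1).foldl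
    (fun Y i => Y.set i.toNat (pvFactLoop (PySem.List.pyGetD X (i + 1) 0)))
    (List.replicate X.length 0)).set (X.length - 1) (pvFactLoop (PySem.List.pyGetD X 0 0))

-- ===== PORT B =====
-- product of the integers in [lo, hi] by binary splitting (Source B's _prod)
def pvProd (lo hi : Int) : Int :=
  if lo > hi then 1
  else if lo = hi then lo
  else pvProd lo (PySem.Int.floordiv (lo + hi) 2)
       * pvProd (PySem.Int.floordiv (lo + hi) 2 + 1) hi
termination_by (hi - lo).toNat
decreasing_by
  · have := PySem.Int.floordiv_two_mid_bounds (lo := lo) (hi := hi) (by omega)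
    have h2 : PySem.Int.floordiv (lo + hi) 2 < hi :=
      (PySem.Int.floordiv_lt_iff_lt_mul (by omega)).mpr (by omega)
    omega
  · have := PySem.Int.floordiv_two_mid_bounds (lo := lo) (hi := hi) (by omega)
    omega

def Transforma_vetor_alt (X : List Int) : List Int :=
  (PySem.List.slice X (some 1) none ++ [PySem.List.pyGetD X 0 0]).map (fun v => pvProd 2 v)

-- ===== PRECONDITION & SPEC =====
-- Pre_ excludes only the empty list, on which both Pythons raise IndexError.
def Pre_Transforma_vetor (X : List Int) : Prop := X ≠ []
instance (X : List Int) : Decidable (Pre_Transforma_vetor X) := by unfold Pre_Transforma_vetor; infer_instance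
def pvWitness_Transforma_vetor : List Int := [3, 1, 4, -2]

def Spec_Transforma_vetor (X : List Int) (out : List Int) : Prop := out = Transforma_vetor_alt X
instance (X : List Int) (out : List Int) : Decidable (Spec_Transforma_vetor X out) := by unfold Spec_Transforma_vetor; infer_instance

-- ===== CLAIM (what is proved, stated in full; the proofs are below) =====
def Claim_equal_Transforma_vetor : Prop := ∀ (X : List Int), Dom_Transforma_vetor X → Pre_Transforma_vetor X → Spec_Transforma_vetor X (Transforma_vetor X)

-- ===== LEMMAS AND PROOFS =====

-- the binary-splitting product is the product of the range
lemma pvProd_eq_prod (lo hi : Int) : pvProd lo hi = (PySem.List.pyRange lo (hi + 1) 1).prod := by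
  by_cases hgt : lo > hi
  · rw [pvProd, if_pos hgt, PySem.List.pyRange_one_eq_nil (by omega), List.prod_nil]
  · by_cases heq : lo = hi
    · subst heq
      rw [pvProd, if_neg hgt, if_pos rfl, PySem.List.pyRange_one_singleton, List.prod_singleton]
    · have hlt : lo < hi := by omega
      have hmid := PySem.Int.floordiv_two_mid_bounds (lo := lo) (hi := hi) (by omega)
      have h2 : PySem.Int.floordiv (lo + hi) 2 < hi :=
        (PySem.Int.floordiv_lt_iff_lt_mul (by omega)).mpr (by omega)
      rw [pvProd, if_neg hgt, if_neg heq,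
          pvProd_eq_prod lo (PySem.Int.floordiv (lo + hi) 2),
          pvProd_eq_prod (PySem.Int.floordiv (lo + hi) 2 + 1) hi,
          PySem.List.pyRange_one_append lo (PySem.Int.floordiv (lo + hi) 2 + 1) (hi + 1)
            (by omega) (by omega),
          List.prod_append]
termination_by (hi - lo).toNat
decreasing_by
  · omega
  · omega

-- A's sequential multiply loop computes the same product
lemma pvFact_eq (v : Int) : pvFactLoop v = pvProd 2 v := by
  rw [pvProd_eq_prod, pvFactLoop, ← List.prod_eq_foldl]
  by_cases h0 : v < 1
  · rw [PySem.List.pyRange_one_eq_nil (by omega), PySem.List.pyRange_one_eq_nil (by omega)]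
  · rw [PySem.List.pyRange_one_cons (by omega : (1 : Int) < v + 1), List.prod_cons, one_mul]
    norm_num

-- the index-writing loop of A fills the first m positions with factorials of X[1..m]
lemma pvLoop_fills (X : List Int) :
    ∀ (m : Nat) (init : List Int), m ≤ (X.drop 1).length → m ≤ init.length →
    (PySem.List.pyRange 0 (m : Int) 1).foldl
        (fun Y i => Y.set i.toNat (pvFactLoop (PySem.List.pyGetD X (i + 1) 0))) init
      = ((X.drop 1).take m).map pvFactLoop ++ init.drop m := by
  intro m
  induction m with
  | zero => intro init _ _; simp
  | succ m ih =>
    intro init hm hi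
    have h1 : PySem.List.pyRange 0 ((m + 1 : Nat) : Int) 1
        = PySem.List.pyRange 0 (m : Int) 1 ++ [(m : Int)] := by
      have := PySem.List.pyRange_one_succ_right (a := 0) (b := (m : Int)) (by positivity)
      simpa using this
    rw [h1, List.foldl_append, ih init (by omega) (by omega)]
    simp only [List.foldl_cons, List.foldl_nil]
    have hlen : (((X.drop 1).take m).map pvFactLoop).length = m := by
      rw [List.length_map, List.length_take]; omega
    have hd : (X.drop 1).length = X.length - 1 := by simp
    have hx : m + 1 < X.length := by omega
    have hget : PySem.List.pyGetD X ((m : Int) + 1) 0 = (X.drop 1).getD m 0 := by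
      rw [show ((m : Int) + 1) = ((m + 1 : Nat) : Int) by push_cast; ring,
          PySem.List.pyGetD_natCast]
      simp [List.getD_eq_getElem?_getD]
    -- set at position m lands in init.drop m
    have hset : ∀ (T L : List Int) (v : Int), T.length = m → 0 < L.length →
        (T ++ L).set m v = T ++ v :: L.drop 1 := by
      intro T L v hT hL
      rcases L with _ | ⟨l, ls⟩
      · simp at hL
      · rw [List.set_append_right _ _ (by omega)]
        simp [hT]
    rw [show ((m : Int)).toNat = m by simp, hset _ _ _ hlen (by simp [List.length_drop]; omega)]
    have htake : (X.drop 1).take (m + 1) = (X.drop 1).take m ++ [(X.drop 1).getD m 0] := by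
      rw [List.take_add_one]
      simp [List.getD_eq_getElem?_getD]
      rw [List.getElem?_eq_getElem hx]
      simp
    rw [htake]
    simp [hget, List.drop_drop]

-- ===== VERDICT (by name: the statement is the Claim_ definition above) =====
theorem Transforma_vetor_spec : Claim_equal_Transforma_vetor := by
  intro X _ hpre
  rcases X with _ | ⟨x, xs⟩
  · exact absurd rfl hpre
  · show Transforma_vetor (x :: xs) = Transforma_vetor_alt (x :: xs)
    unfold Transforma_vetor Transforma_vetor_alt
    have hdrop : (x :: xs).drop 1 = xs := rfl
    have hlen : ((x :: xs).length : Int) - 1 = (xs.length : Nat) := by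
      simp
    rw [hlen, pvLoop_fills (x :: xs) xs.length (List.replicate (x :: xs).length 0)
          (by simp) (by simp)]
    have hdropped : (List.replicate (x :: xs).length (0 : Int)).drop xs.length = [0] := by
      simp [List.drop_replicate]
    rw [hdrop, List.take_length, hdropped]
    have hsl : PySem.List.slice (x :: xs) (some 1) none = xs := by
      rw [PySem.List.slice_from _ (by norm_num)]; rfl
    rw [hsl]
    have hset : (xs.map pvFactLoop ++ [0]).set ((x :: xs).length - 1)
          (pvFactLoop (PySem.List.pyGetD (x :: xs) 0 0))
        = xs.map pvFactLoop ++ [pvFactLoop x] := by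
      rw [List.set_append_right _ _ (by simp)]
      simp
    rw [hset]
    simp [pvFact_eq]
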